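-- pv_equiv track=rewrite | github.com/dantebarbieri/dwarf-fortress-chronicle | scripts/moods.py | _group_by_figure
-- ===== SOURCE A (Python) =====
-- from collections import defaultdict
--
-- def _figure_key(ev: dict) -> str:
--     """Extract the relevant HF ID from an event."""
--     return str(ev.get("maker_hfid") or ev.get("hfid") or "-1")
--
-- def _group_by_figure(
--     masterpieces: list[dict],
--     artifacts: list[dict],
--     moods: list[dict],
-- ) -> dict[str, list[dict]]:
--     """Group all events by figure, sorted by year/seconds72 within each group."""
--     groups: dict[str, list[dict]] = defaultdict(list)
--
--     for ev in masterpieces: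
--         fid = _figure_key(ev)
--         if fid != "-1":
--             groups[fid].append(ev)
--     for ev in artifacts:
--         fid = str(ev.get("hfid", "-1"))
--         if fid != "-1":
--             groups[fid].append(ev)
--     for ev in moods:
--         fid = str(ev.get("hfid", "-1"))
--         if fid != "-1":
--             groups[fid].append(ev)
--
--     # Sort each figure's events chronologically
--     for fid in groups:
--         groups[fid].sort(key=lambda e: (int(e.get("year", 0)), int(e.get("seconds72", 0))))
--
--     return dict(groups)
-- ===== SOURCE B (Python) =====
-- def _figure_key(ev: dict) -> str:
--     """Extract the relevant HF ID from an event."""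
--     return str(ev.get("maker_hfid") or ev.get("hfid") or "-1")
--
-- def _group_by_figure(masterpieces, artifacts, moods):
--     # Tag every event with its figure id once, in source order.
--     pairs = (
--         [(_figure_key(ev), ev) for ev in masterpieces]
--         + [(str(ev.get("hfid", "-1")), ev) for ev in artifacts]
--         + [(str(ev.get("hfid", "-1")), ev) for ev in moods]
--     )
--     # Distinct figure ids in first-appearance order.
--     order = []
--     for fid, _ in pairs:
--         if fid != "-1" and fid not in order:
--             order.append(fid)
--     # One sorted selection per figure.
--     return {
--         fid: sorted(
--             (ev for f, ev in pairs if f == fid),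
--             key=lambda e: (int(e.get("year", 0)), int(e.get("seconds72", 0))),
--         )
--         for fid in order
--     }
-- ===== Notes on version B (the rewrite author's own statement) =====
-- stated objective: alternative
-- what changed: Instead of a defaultdict incrementally appended to during three loops and then sorted group-by-group in place, B builds one flat list of (figure-id, event) tags, collects the distinct non-'-1' ids in first-appearance order, and produces the result as a dict comprehension whose value for each id is a single sorted selection from the flat list.
import Mathlib
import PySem

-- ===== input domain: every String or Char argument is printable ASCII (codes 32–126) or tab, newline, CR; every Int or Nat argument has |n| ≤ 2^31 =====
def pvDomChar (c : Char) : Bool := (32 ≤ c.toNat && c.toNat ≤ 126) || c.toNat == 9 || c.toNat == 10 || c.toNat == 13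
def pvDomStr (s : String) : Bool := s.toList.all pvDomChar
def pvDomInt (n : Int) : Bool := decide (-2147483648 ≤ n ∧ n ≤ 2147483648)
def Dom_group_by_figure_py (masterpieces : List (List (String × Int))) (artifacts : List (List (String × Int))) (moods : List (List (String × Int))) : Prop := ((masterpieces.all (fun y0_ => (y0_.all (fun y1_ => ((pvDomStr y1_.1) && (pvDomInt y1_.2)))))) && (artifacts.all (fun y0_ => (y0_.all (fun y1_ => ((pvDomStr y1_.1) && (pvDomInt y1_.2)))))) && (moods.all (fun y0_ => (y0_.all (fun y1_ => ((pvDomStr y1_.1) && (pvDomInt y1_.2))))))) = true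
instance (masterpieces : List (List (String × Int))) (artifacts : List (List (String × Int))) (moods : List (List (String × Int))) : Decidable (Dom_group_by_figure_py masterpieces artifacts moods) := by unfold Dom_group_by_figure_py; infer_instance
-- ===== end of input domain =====

-- B replaces A's three defaultdict-append loops + per-group in-place sort by one flat keyed
-- list, an ordered list of distinct ids, and a per-id sorted selection (objective: alternative).

-- ===== PORT A =====
-- shared with B (Python's _figure_key and the .get expressions are shared module helpers)

-- str(ev.get("maker_hfid") or ev.get("hfid") or "-1"): Python `or` keeps the first truthy
-- value (None and 0 are falsy); ported step for step.
def pyOrTruthy (a b : Option Int) : Option Int :=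
  match a with
  | some v => if v = 0 then b else some v
  | none => b

def figureKey (ev : List (String × Int)) : String :=
  match pyOrTruthy ((PySem.Dict.mk ev).get? "maker_hfid") ((PySem.Dict.mk ev).get? "hfid") with
  | some v => if v = 0 then "-1" else PySem.Int.toStr v
  | none => "-1"

-- str(ev.get("hfid", "-1"))
def hfidKey (ev : List (String × Int)) : String :=
  match (PySem.Dict.mk ev).get? "hfid" with
  | some v => PySem.Int.toStr v
  | none => "-1"

-- int(e.get("year", 0)) and int(e.get("seconds72", 0)) (int() on an int is the identity)
def yearOf (e : List (String × Int)) : Int := (PySem.Dict.mk e).getD "year" 0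
def secOf (e : List (String × Int)) : Int := (PySem.Dict.mk e).getD "seconds72" 0

def group_by_figure_py (masterpieces : List (List (String × Int))) (artifacts : List (List (String × Int))) (moods : List (List (String × Int))) : List (String × List (List (String × Int))) :=
  -- groups = defaultdict(list); groups[fid].append(ev) is modify fid [] (· ++ [ev])
  let g0 := masterpieces.foldl (fun g ev =>
      let fid := figureKey ev
      if fid ≠ "-1" then g.modify fid [] (· ++ [ev]) else g) PySem.Dict.empty
  let g1 := artifacts.foldl (fun g ev =>
      let fid := hfidKey ev
      if fid ≠ "-1" then g.modify fid [] (· ++ [ev]) else g) g0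
  let g2 := moods.foldl (fun g ev =>
      let fid := hfidKey ev
      if fid ≠ "-1" then g.modify fid [] (· ++ [ev]) else g) g1
  -- for fid in groups: groups[fid].sort(key=...): each value replaced in place; dict(groups)
  g2.items.map (fun p => (p.1, PySem.List.sorted2 p.2 yearOf secOf))

-- ===== PORT B =====
def group_by_figure_py_alt (masterpieces : List (List (String × Int))) (artifacts : List (List (String × Int))) (moods : List (List (String × Int))) : List (String × List (List (String × Int))) :=
  let pairs := masterpieces.map (fun ev => (figureKey ev, ev))
      ++ artifacts.map (fun ev => (hfidKey ev, ev))
      ++ moods.map (fun ev => (hfidKey ev, ev))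
  let order := pairs.foldl (fun acc p =>
      if p.1 ≠ "-1" ∧ p.1 ∉ acc then acc ++ [p.1] else acc) ([] : List String)
  order.map (fun fid =>
    (fid, PySem.List.sorted2 ((pairs.filter (fun p => p.1 == fid)).map (fun p => p.2)) yearOf secOf))

-- ===== PRECONDITION & SPEC =====
def Spec_group_by_figure_py (masterpieces : List (List (String × Int))) (artifacts : List (List (String × Int))) (moods : List (List (String × Int))) (out : List (String × List (List (String × Int)))) : Prop := out = group_by_figure_py_alt masterpieces artifacts moods
instance (masterpieces : List (List (String × Int))) (artifacts : List (List (String × Int))) (moods : List (List (String × Int))) (out : List (String × List (List (String × Int)))) : Decidable (Spec_group_by_figure_py masterpieces artifacts moods out) := by unfold Spec_group_by_figure_py; infer_instance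

-- ===== CLAIM (what is proved, stated in full; the proofs are below) =====
def Claim_equal_group_by_figure_py : Prop := ∀ (masterpieces : List (List (String × Int))) (artifacts : List (List (String × Int))) (moods : List (List (String × Int))), Dom_group_by_figure_py masterpieces artifacts moods → Spec_group_by_figure_py masterpieces artifacts moods (group_by_figure_py masterpieces artifacts moods)

-- ===== LEMMAS AND PROOFS =====

-- A's loop over events, with its "-1" skip, is the plain modify-append loop over the
-- keyed-and-filtered pair list.
theorem foldA_eq_foldP (k : List (String × Int) → String) (l : List (List (String × Int)))
    (d : PySem.Dict String (List (List (String × Int)))) :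
    l.foldl (fun g ev =>
      let fid := k ev
      if fid ≠ "-1" then g.modify fid [] (· ++ [ev]) else g) d
    = ((l.map (fun ev => (k ev, ev))).filter (fun p => p.1 ≠ "-1")).foldl
        (fun g p => g.modify p.1 [] (· ++ [p.2])) d := by
  induction l generalizing d with
  | nil => rfl
  | cons ev t ih =>
    simp only [List.foldl_cons, List.map_cons, List.filter_cons]
    by_cases h : k ev = "-1"
    · rw [if_neg (by simp [h]), if_neg (by simp [h])]
      exact ih d
    · rw [if_pos (by simp [h]), if_pos (by simp [h]), List.foldl_cons]
      exact ih _

-- B's order loop is set(ofList) of the filtered id list.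
theorem order_eq (l : List (String × List (String × Int))) (acc : List String) :
    l.foldl (fun acc p => if p.1 ≠ "-1" ∧ p.1 ∉ acc then acc ++ [p.1] else acc) acc
    = PySem.Set.update acc ((l.filter (fun p => p.1 ≠ "-1")).map (fun p => p.1)) := by
  induction l generalizing acc with
  | nil => rfl
  | cons p t ih =>
    simp only [List.foldl_cons, List.filter_cons]
    by_cases h : p.1 = "-1"
    · simp [h, ih]
    · by_cases hm : p.1 ∈ acc <;>
        simp [h, hm, ih, PySem.Set.update_cons]


theorem group_by_figure_py_eq_alt (masterpieces artifacts moods : List (List (String × Int))) :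
    group_by_figure_py masterpieces artifacts moods
    = group_by_figure_py_alt masterpieces artifacts moods := by
  unfold group_by_figure_py group_by_figure_py_alt
  -- the flat keyed pair list and its non-"-1" part
  set pairs := masterpieces.map (fun ev => (figureKey ev, ev))
      ++ artifacts.map (fun ev => (hfidKey ev, ev))
      ++ moods.map (fun ev => (hfidKey ev, ev)) with hpairs
  have hfold :
      moods.foldl (fun g ev =>
        let fid := hfidKey ev
        if fid ≠ "-1" then g.modify fid [] (· ++ [ev]) else g)
      (artifacts.foldl (fun g ev =>
        let fid := hfidKey ev
        if fid ≠ "-1" then g.modify fid [] (· ++ [ev]) else g)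
      (masterpieces.foldl (fun g ev =>
        let fid := figureKey ev
        if fid ≠ "-1" then g.modify fid [] (· ++ [ev]) else g) PySem.Dict.empty))
      = (pairs.filter (fun p => p.1 ≠ "-1")).foldl
          (fun g p => g.modify p.1 [] (· ++ [p.2])) PySem.Dict.empty := by
    rw [foldA_eq_foldP, foldA_eq_foldP, foldA_eq_foldP, hpairs]
    rw [List.filter_append, List.filter_append, List.foldl_append, List.foldl_append]
  simp only [hfold]
  set P := pairs.filter (fun p => p.1 ≠ "-1") with hP
  set g2 := P.foldl (fun g p => g.modify p.1 [] (· ++ [p.2])) PySem.Dict.empty with hg2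
  -- keys of A's dict = B's order list
  have hnodup : g2.keys.Nodup := by
    rw [hg2]
    exact PySem.Dict.nodup_keys_foldl_modify_key P (fun p => p.1) [] (fun _ p => (· ++ [p.2]))
      PySem.Dict.empty (by simp [PySem.Dict.keys_empty])
  have hkeys : g2.keys = PySem.Set.ofList (P.map (fun p => p.1)) := by
    rw [hg2, PySem.Dict.keys_foldl_modify_key P (fun p => p.1) [] (fun _ p => (· ++ [p.2]))]
    rw [PySem.Dict.keys_empty]
    exact PySem.Set.update_empty _
  have horder : pairs.foldl (fun acc p => if p.1 ≠ "-1" ∧ p.1 ∉ acc then acc ++ [p.1] else acc)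
      ([] : List String) = g2.keys := by
    rw [order_eq, hkeys, hP]
    exact PySem.Set.update_empty _
  -- A's value for each key
  have hgetD : ∀ c, g2.getD c [] = (P.filter (fun p => p.1 == c)).map (fun p => p.2) := by
    intro c
    rw [hg2, PySem.Dict.getD_foldl_modify_append]
    simp [PySem.Dict.getD_empty]
  rw [PySem.Dict.items_eq_map_keys g2 hnodup [], horder, List.map_map]
  apply List.map_congr_left
  intro k hk
  have hk1 : k ≠ "-1" := by
    rw [hkeys] at hk
    rcases (PySem.Set.mem_ofList _ _).mp hk with hmem
    rcases List.mem_map.mp hmem with ⟨p, hpP, hpk⟩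
    have := List.of_mem_filter hpP
    simpa [hpk] using this
  have hfilter : pairs.filter (fun p => p.1 == k) = P.filter (fun p => p.1 == k) := by
    rw [hP, List.filter_filter]
    apply List.filter_congr
    intro p _
    by_cases hpk : p.1 = k
    · simp [hpk, hk1]
    · simp [hpk]
  simp only [Function.comp, hgetD, hfilter]

-- ===== VERDICT (by name: the statement is the Claim_ definition above) =====
theorem group_by_figure_py_spec : Claim_equal_group_by_figure_py := by
  intro masterpieces artifacts moods _
  unfold Spec_group_by_figure_py
  exact group_by_figure_py_eq_alt masterpieces artifacts moods
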